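-- pv_equiv track=rewrite | github.com/Lavish213/CRAVE | backend/app/services/entity/brand_aliases.py | resolve_brand_alias
-- ===== SOURCE A (Python) =====
-- BRAND_ALIASES = {
--     "mcdonalds": ["mcdonald's", "mc donalds", "mcdonald"],
--     "burger king": ["burgerking"],
--     "taco bell": ["tacobell"],
--     "kfc": ["kentucky fried chicken"],
-- }
--
-- def resolve_brand_alias(name: str | None) -> str | None:
--     """
--     Normalize known brand aliases to canonical name.
--
--     Example:
--     "mcdonald's" → "mcdonalds"
--     """
--
--     if not name:
--         return None
--
--     name = name.lower().strip()
--
--     for canonical, aliases in BRAND_ALIASES.items():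
--
--         if name == canonical:
--             return canonical
--
--         if name in aliases:
--             return canonical
--
--     return name
-- ===== SOURCE B (Python) =====
-- BRAND_ALIASES = {
--     "mcdonalds": ["mcdonald's", "mc donalds", "mcdonald"],
--     "burger king": ["burgerking"],
--     "taco bell": ["tacobell"],
--     "kfc": ["kentucky fried chicken"],
-- }
--
-- # Flat lookup table built once at module load: every canonical maps to itself,
-- # every alias maps to its canonical.
-- ALIAS_TO_CANONICAL = {}
-- for _canonical, _aliases in BRAND_ALIASES.items():
--     ALIAS_TO_CANONICAL[_canonical] = _canonical
--     for _a in _aliases: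
--         ALIAS_TO_CANONICAL[_a] = _canonical
--
-- def resolve_brand_alias(name):
--     if not name:
--         return None
--     name = name.lower().strip()
--     return ALIAS_TO_CANONICAL.get(name, name)
-- ===== Notes on version B (the rewrite author's own statement) =====
-- stated objective: simpler
-- what changed: Replaces the per-call loop over BRAND_ALIASES (with an inner alias-list membership scan) by a single flat alias->canonical dict built once at module load, so the function body is one guarded dict lookup with the normalized name as fallback.
import Mathlib
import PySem

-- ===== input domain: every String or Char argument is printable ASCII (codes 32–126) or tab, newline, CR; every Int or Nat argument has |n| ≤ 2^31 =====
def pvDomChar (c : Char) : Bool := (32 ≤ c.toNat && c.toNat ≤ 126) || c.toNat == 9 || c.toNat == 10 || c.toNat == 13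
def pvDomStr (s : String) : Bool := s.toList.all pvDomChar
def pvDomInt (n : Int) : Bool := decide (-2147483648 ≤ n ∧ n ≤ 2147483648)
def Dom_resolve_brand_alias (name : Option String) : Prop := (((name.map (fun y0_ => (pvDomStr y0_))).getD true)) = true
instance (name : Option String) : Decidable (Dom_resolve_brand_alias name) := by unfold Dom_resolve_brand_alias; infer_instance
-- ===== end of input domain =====

-- B replaces A's per-call loop over BRAND_ALIASES by a flat alias->canonical table built once,
-- so the function body is a single lookup with the normalized name as fallback (simpler).

-- ===== PORT A =====
def pvBrandAliases : List (String × List String) :=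
  [("mcdonalds", ["mcdonald's", "mc donalds", "mcdonald"]),
   ("burger king", ["burgerking"]),
   ("taco bell", ["tacobell"]),
   ("kfc", ["kentucky fried chicken"])]

-- A's 'for canonical, aliases in BRAND_ALIASES.items()' loop with its two early returns
def pvLoopA (n : String) : List (String × List String) → Option String
  | [] => none
  | (canonical, aliases) :: rest =>
    if n = canonical then some canonical
    else if n ∈ aliases then some canonical
    else pvLoopA n rest

def resolve_brand_alias (name : Option String) : Option String :=
  match name with
  | none => none
  | some s =>
    if s = "" then none   -- 'if not name: return None'
    else
      let n := PySem.Str.strip (PySem.Str.lower s)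
      match pvLoopA n pvBrandAliases with
      | some c => some c
      | none => some n    -- fall through: 'return name'

-- ===== PORT B =====
-- module-level table: every canonical maps to itself, every alias to its canonical
def pvAliasToCanonical : PySem.Dict String String :=
  pvBrandAliases.foldl
    (fun d p => p.2.foldl (fun d a => d.insert a p.1) (d.insert p.1 p.1))
    (PySem.Dict.empty)

def resolve_brand_alias_alt (name : Option String) : Option String :=
  match name with
  | none => none
  | some s =>
    if s = "" then none
    else
      let n := PySem.Str.strip (PySem.Str.lower s)
      some (pvAliasToCanonical.getD n n)   -- ALIAS_TO_CANONICAL.get(name, name)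

-- ===== PRECONDITION & SPEC =====
def Spec_resolve_brand_alias (name : Option String) (out : Option String) : Prop := out = resolve_brand_alias_alt name
instance (name : Option String) (out : Option String) : Decidable (Spec_resolve_brand_alias name out) := by unfold Spec_resolve_brand_alias; infer_instance

-- ===== CLAIM (what is proved, stated in full; the proofs are below) =====
def Claim_equal_resolve_brand_alias : Prop := ∀ (name : Option String), Dom_resolve_brand_alias name → Spec_resolve_brand_alias name (resolve_brand_alias name)

-- ===== LEMMAS AND PROOFS =====

-- core fact: for ANY normalized string n, A's loop result (with fallback n) equals B's table lookup;
-- case split on n being each of the 10 keys of the table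
lemma pvLookup_eq (n : String) :
    (match pvLoopA n pvBrandAliases with
     | some c => some c
     | none => some n) = some (pvAliasToCanonical.getD n n) := by
  by_cases h1 : n = "mcdonalds" <;>
  by_cases h2 : n = "mcdonald's" <;>
  by_cases h3 : n = "mc donalds" <;>
  by_cases h4 : n = "mcdonald" <;>
  by_cases h5 : n = "burger king" <;>
  by_cases h6 : n = "burgerking" <;>
  by_cases h7 : n = "taco bell" <;>
  by_cases h8 : n = "tacobell" <;>
  by_cases h9 : n = "kfc" <;>
  by_cases h10 : n = "kentucky fried chicken" <;>
    try simp_all [pvLoopA, pvBrandAliases, pvAliasToCanonical,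
      PySem.Dict.getD, PySem.Dict.get?, PySem.Dict.insert, PySem.Dict.empty]
  -- remaining case: n is none of the keys; each '==' in the lookup is false
  simp [List.find?,
    show ("mcdonalds" == n) = false from beq_eq_false_iff_ne.mpr (Ne.symm h1),
    show ("mcdonald's" == n) = false from beq_eq_false_iff_ne.mpr (Ne.symm h2),
    show ("mc donalds" == n) = false from beq_eq_false_iff_ne.mpr (Ne.symm h3),
    show ("mcdonald" == n) = false from beq_eq_false_iff_ne.mpr (Ne.symm h4),
    show ("burger king" == n) = false from beq_eq_false_iff_ne.mpr (Ne.symm h5),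
    show ("burgerking" == n) = false from beq_eq_false_iff_ne.mpr (Ne.symm h6),
    show ("taco bell" == n) = false from beq_eq_false_iff_ne.mpr (Ne.symm h7),
    show ("tacobell" == n) = false from beq_eq_false_iff_ne.mpr (Ne.symm h8),
    show ("kfc" == n) = false from beq_eq_false_iff_ne.mpr (Ne.symm h9),
    show ("kentucky fried chicken" == n) = false from beq_eq_false_iff_ne.mpr (Ne.symm h10)]

-- ===== VERDICT (by name: the statement is the Claim_ definition above) =====
theorem resolve_brand_alias_spec : Claim_equal_resolve_brand_alias := by
  intro name _
  unfold Spec_resolve_brand_alias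
  cases name with
  | none => rfl
  | some s =>
    rw [resolve_brand_alias, resolve_brand_alias_alt]
    by_cases hs : s = ""
    · rw [if_pos hs, if_pos hs]
    · rw [if_neg hs, if_neg hs]
      generalize PySem.Str.strip (PySem.Str.lower s) = n
      exact pvLookup_eq n
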